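-- pv_equiv track=rewrite | github.com/ngramSQL/ngramSQL | plugins/ngram_lists/plugin.py | __unpack_time_series_dict
-- ===== SOURCE A (Python) =====
-- def __unpack_time_series_dict(ngram_dicts, start_year, end_year):
--     time_series = {}
--
--     for ngram, data_dict in ngram_dicts.items():
--         data_list = []
--
--         for i in range(int(start_year), int(end_year) + 1):
--             if i in data_dict.keys():
--                 data_list.append(data_dict[i])
--             else:
--                 data_list.append(0)
--
--         time_series.update({ngram: data_list})
--
--     return time_series
-- ===== SOURCE B (Python) =====
-- def __unpack_time_series_dict(ngram_dicts, start_year, end_year):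
--     start = int(start_year)
--     end = int(end_year)
--     span = end - start
--     time_series = {}
--
--     for ngram, data_dict in ngram_dicts.items():
--         data_list = [0] * (span + 1 if span >= 0 else 0)
--         for year, value in data_dict.items():
--             idx = int(year) - start
--             if 0 <= idx <= span:
--                 data_list[idx] = value
--         time_series[ngram] = data_list
--
--     return time_series
-- ===== Notes on version B (the rewrite author's own statement) =====
-- stated objective: alternative
-- what changed: Replaces the per-year gather loop with membership test + lookup per year by a zero-filled preallocated list into which each stored (year, value) entry is scattered at index year-start, guarded by range.
import Mathlib
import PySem

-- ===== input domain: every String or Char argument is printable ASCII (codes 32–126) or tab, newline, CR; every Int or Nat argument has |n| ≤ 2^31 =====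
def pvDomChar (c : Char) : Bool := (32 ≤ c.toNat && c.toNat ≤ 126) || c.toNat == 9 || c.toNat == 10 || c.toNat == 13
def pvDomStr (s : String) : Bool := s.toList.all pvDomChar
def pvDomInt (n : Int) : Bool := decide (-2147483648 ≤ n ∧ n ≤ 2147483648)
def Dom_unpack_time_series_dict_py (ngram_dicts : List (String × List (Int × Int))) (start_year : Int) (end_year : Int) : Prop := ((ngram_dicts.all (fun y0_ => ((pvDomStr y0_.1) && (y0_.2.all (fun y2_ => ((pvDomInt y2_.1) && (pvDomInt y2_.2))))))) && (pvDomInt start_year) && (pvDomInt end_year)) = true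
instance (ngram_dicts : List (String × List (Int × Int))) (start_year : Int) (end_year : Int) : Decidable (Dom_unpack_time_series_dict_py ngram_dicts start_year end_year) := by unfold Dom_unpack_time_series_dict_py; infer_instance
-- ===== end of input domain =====

-- B builds each per-ngram list by preallocating a zero list and scattering stored (year, value)
-- entries into it (alternative decomposition); return values proven equal on dicts with distinct keys.

-- ===== PORT A =====
def unpack_time_series_dict_py (ngram_dicts : List (String × List (Int × Int))) (start_year : Int) (end_year : Int) : List (String × List Int) :=
  (ngram_dicts.foldl (fun ts p =>
      let d : PySem.Dict Int Int := PySem.Dict.mk p.2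
      let data_list : List Int :=
        (PySem.List.pyRange start_year (end_year + 1) 1).foldl
          (fun acc i => if d.contains i then acc ++ [d.getD i 0] else acc ++ [0]) []
      ts.insert p.1 data_list)
    (PySem.Dict.empty : PySem.Dict String (List Int))).items

-- ===== PORT B =====
def unpack_time_series_dict_py_alt (ngram_dicts : List (String × List (Int × Int))) (start_year : Int) (end_year : Int) : List (String × List Int) :=
  (ngram_dicts.foldl (fun ts p =>
      let span : Int := end_year - start_year
      let data_list : List Int :=
        p.2.foldl (fun acc kv =>
          let idx : Int := kv.1 - start_year
          if 0 ≤ idx ∧ idx ≤ span then acc.set idx.toNat kv.2 else acc)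
        (List.replicate (if 0 ≤ span then (span + 1).toNat else 0) 0)
      ts.insert p.1 data_list)
    (PySem.Dict.empty : PySem.Dict String (List Int))).items

-- ===== PRECONDITION & SPEC =====
-- Pre_ excludes association lists in which some inner year-dict carries a duplicate key: such a
-- list does not arise from a Python dict, and the ports' two dict readings (first-match gather
-- vs last-write scatter) are equally defensible there.
def Pre_unpack_time_series_dict_py (ngram_dicts : List (String × List (Int × Int))) (start_year : Int) (end_year : Int) : Prop :=
  ∀ p ∈ ngram_dicts, (p.2.map Prod.fst).Nodup
instance (ngram_dicts : List (String × List (Int × Int))) (start_year : Int) (end_year : Int) : Decidable (Pre_unpack_time_series_dict_py ngram_dicts start_year end_year) := by unfold Pre_unpack_time_series_dict_py; infer_instance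
def pvWitness_unpack_time_series_dict_py : (List (String × List (Int × Int))) × Int × Int :=
  ([("a", [(0, 1), (2, 3)])], 0, 3)

def Spec_unpack_time_series_dict_py (ngram_dicts : List (String × List (Int × Int))) (start_year : Int) (end_year : Int) (out : List (String × List Int)) : Prop := out = unpack_time_series_dict_py_alt ngram_dicts start_year end_year
instance (ngram_dicts : List (String × List (Int × Int))) (start_year : Int) (end_year : Int) (out : List (String × List Int)) : Decidable (Spec_unpack_time_series_dict_py ngram_dicts start_year end_year out) := by unfold Spec_unpack_time_series_dict_py; infer_instance

-- ===== CLAIM (what is proved, stated in full; the proofs are below) =====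
def Claim_equal_unpack_time_series_dict_py : Prop := ∀ (ngram_dicts : List (String × List (Int × Int))) (start_year : Int) (end_year : Int), Dom_unpack_time_series_dict_py ngram_dicts start_year end_year → Pre_unpack_time_series_dict_py ngram_dicts start_year end_year → Spec_unpack_time_series_dict_py ngram_dicts start_year end_year (unpack_time_series_dict_py ngram_dicts start_year end_year)

-- ===== LEMMAS AND PROOFS =====

-- the scatter fold preserves the length of the accumulator
theorem pv_scatter_length (s span : Int) (l : List (Int × Int)) (acc : List Int) :
    (l.foldl (fun acc kv =>
        if 0 ≤ kv.1 - s ∧ kv.1 - s ≤ span then acc.set (kv.1 - s).toNat kv.2 else acc) acc).length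
      = acc.length := by
  induction l generalizing acc with
  | nil => rfl
  | cons hd tl ih =>
      simp only [List.foldl_cons]
      rw [ih]
      split_ifs <;> simp

-- element j of the scatter fold is the first-match lookup of (s + j), under Nodup keys
theorem pv_scatter_getElem (s span : Int) (l : List (Int × Int)) (acc : List Int)
    (hnd : (l.map Prod.fst).Nodup) (hlen : acc.length = (span + 1).toNat)
    (j : Nat) (hj : j < acc.length)
    (hj' : j < (l.foldl (fun acc kv =>
        if 0 ≤ kv.1 - s ∧ kv.1 - s ≤ span then acc.set (kv.1 - s).toNat kv.2 else acc) acc).length) :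
    (l.foldl (fun acc kv =>
        if 0 ≤ kv.1 - s ∧ kv.1 - s ≤ span then acc.set (kv.1 - s).toNat kv.2 else acc) acc)[j]'hj'
      = ((PySem.Dict.mk l).get? (s + j)).getD (acc[j]'hj) := by
  induction l generalizing acc with
  | nil => simp [PySem.Dict.get?]
  | cons hd tl ih =>
      simp only [List.map_cons, List.nodup_cons] at hnd
      obtain ⟨hhd, htl⟩ := hnd
      simp only [List.foldl_cons]
      have hstep : ∀ (a : List Int), ((if 0 ≤ hd.1 - s ∧ hd.1 - s ≤ span then a.set (hd.1 - s).toNat hd.2 else a)).length = a.length := by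
        intro a; split_ifs <;> simp
      have hlen' : ((if 0 ≤ hd.1 - s ∧ hd.1 - s ≤ span then acc.set (hd.1 - s).toNat hd.2 else acc)).length = (span + 1).toNat := by
        rw [hstep]; exact hlen
      have hj2 : j < ((if 0 ≤ hd.1 - s ∧ hd.1 - s ≤ span then acc.set (hd.1 - s).toNat hd.2 else acc)).length := by
        rw [hstep]; exact hj
      rw [ih _ htl hlen' hj2]
      rw [PySem.Dict.get?_mk_cons]
      by_cases hk : hd.1 = s + (j : Int)
      · -- the head's key is exactly year s + j: the guard fires and sets slot j
        have hcond : 0 ≤ hd.1 - s ∧ hd.1 - s ≤ span := by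
          have : (j : Int) < ((span + 1).toNat : Int) := by exact_mod_cast hlen ▸ hj
          omega
        have hget : (PySem.Dict.mk tl).get? (s + (j : Int)) = none := by
          rw [PySem.Dict.get?_eq_none_iff_not_mem_keys]
          intro hmem
          exact hhd (by simpa [PySem.Dict.keys, hk] using hmem)
        have hidx : (hd.1 - s).toNat = j := by omega
        have hbeq : (hd.1 == s + (j : Int)) = true := by simp [hk]
        have hs : s ≤ hd.1 := by omega
        simp [hget, hbeq, hcond, hidx, hs, List.getElem_set_self]
      · -- a different key: slot j is untouched by the head
        have hbeq : (hd.1 == s + (j : Int)) = false := by simpa using hk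
        rw [hbeq]
        simp only [Bool.false_eq_true, if_false]
        congr 1
        split_ifs with hcond
        · have : (hd.1 - s).toNat ≠ j := by omega
          rw [List.getElem_set]
          simp [this]
        · rfl

-- A's per-ngram gather list equals B's per-ngram scatter list, under Nodup inner keys
theorem pv_inner_eq (s e : Int) (dd : List (Int × Int)) (hnd : (dd.map Prod.fst).Nodup) :
    (PySem.List.pyRange s (e + 1) 1).foldl
        (fun acc i => if (PySem.Dict.mk dd).contains i then acc ++ [(PySem.Dict.mk dd).getD i 0] else acc ++ [0]) []
      = dd.foldl (fun acc kv =>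
          if 0 ≤ kv.1 - s ∧ kv.1 - s ≤ e - s then acc.set (kv.1 - s).toNat kv.2 else acc)
          (List.replicate (if 0 ≤ e - s then (e - s + 1).toNat else 0) 0) := by
  -- gather side: the two branches are both appends of the default lookup
  have hgather : (PySem.List.pyRange s (e + 1) 1).foldl
        (fun acc i => if (PySem.Dict.mk dd).contains i then acc ++ [(PySem.Dict.mk dd).getD i 0] else acc ++ [0]) []
      = (PySem.List.pyRange s (e + 1) 1).map (fun i => (PySem.Dict.mk dd).getD i 0) := by
    have hfun : (fun (acc : List Int) (i : Int) => if (PySem.Dict.mk dd).contains i then acc ++ [(PySem.Dict.mk dd).getD i 0] else acc ++ [0])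
        = fun acc i => acc ++ [(PySem.Dict.mk dd).getD i 0] := by
      funext acc i
      split_ifs with h
      · rfl
      · have h' : (PySem.Dict.mk dd).contains i = false := by
          simp only [Bool.not_eq_true] at h; exact h
        rw [PySem.Dict.getD_of_not_contains _ _ h']
    rw [hfun, PySem.List.foldl_append_singleton_eq_map, List.nil_append]
  rw [hgather]
  by_cases hspan : 0 ≤ e - s
  · apply List.ext_getElem
    · rw [List.length_map, PySem.List.length_pyRange_one, pv_scatter_length, List.length_replicate, if_pos hspan]
      omega
    · intro j hj1 hj2
      have hlenr : (List.replicate (if 0 ≤ e - s then (e - s + 1).toNat else 0) (0 : Int)).length = (e - s + 1).toNat := by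
        rw [List.length_replicate, if_pos hspan]
      have hjlen : j < (List.replicate (if 0 ≤ e - s then (e - s + 1).toNat else 0) (0 : Int)).length := by
        rw [pv_scatter_length] at hj2; exact hj2
      rw [pv_scatter_getElem s (e - s) dd _ hnd hlenr j hjlen hj2,
        List.getElem_map, PySem.List.getElem_pyRange_one, List.getElem_replicate,
        PySem.Dict.getD_eq_get?_getD]
  · -- empty range: both sides are []
    have h1 : PySem.List.pyRange s (e + 1) 1 = [] := PySem.List.pyRange_one_eq_nil (by omega)
    rw [h1, if_neg hspan]
    simp only [List.map_nil, List.replicate_zero]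
    symm
    exact List.length_eq_zero_iff.mp (by simpa using pv_scatter_length s (e - s) dd ([] : List Int))

-- ===== VERDICT (by name: the statement is the Claim_ definition above) =====
theorem unpack_time_series_dict_py_spec : Claim_equal_unpack_time_series_dict_py := by
  intro ngram_dicts start_year end_year _ hpre
  unfold Spec_unpack_time_series_dict_py unpack_time_series_dict_py unpack_time_series_dict_py_alt
  congr 1
  apply PySem.List.foldl_congr_mem
  intro ts p hp
  simp only []
  congr 1
  exact pv_inner_eq start_year end_year p.2 (hpre p hp)
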